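-- pv_equiv track=rewrite | github.com/cha-ron/takt | parser.py | procAlts
-- ===== SOURCE A (Python) =====
-- pipe = "|"
--
-- def procAlts(stream):
-- 	ret = []
-- 	end = stream.copy()
--
-- 	while len(end) != 0:
-- 		if pipe in end:
-- 			i = end.index(pipe)
-- 			ret.append(end[:i])
-- 			end = end[i+1:]
-- 		else:
-- 			ret.append(end)
-- 			break
--
-- 	return ret
-- ===== SOURCE B (Python) =====
-- pipe = "|"
--
-- def procAlts(stream):
--     # Single linear pass with a current-segment buffer; drop a lone trailing empty segment.
--     ret = []
--     cur = []
--     for x in stream: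
--         if x == pipe:
--             ret.append(cur)
--             cur = []
--         else:
--             cur.append(x)
--     ret.append(cur)
--     if ret and ret[-1] == []:
--         ret.pop()
--     return ret
-- ===== Notes on version B (the rewrite author's own statement) =====
-- stated objective: simpler
-- what changed: B replaces A's repeated membership-test/.index/slice passes over a shrinking tail with one linear pass maintaining a current-segment buffer, followed by a single drop of a lone trailing empty segment.
import Mathlib
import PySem

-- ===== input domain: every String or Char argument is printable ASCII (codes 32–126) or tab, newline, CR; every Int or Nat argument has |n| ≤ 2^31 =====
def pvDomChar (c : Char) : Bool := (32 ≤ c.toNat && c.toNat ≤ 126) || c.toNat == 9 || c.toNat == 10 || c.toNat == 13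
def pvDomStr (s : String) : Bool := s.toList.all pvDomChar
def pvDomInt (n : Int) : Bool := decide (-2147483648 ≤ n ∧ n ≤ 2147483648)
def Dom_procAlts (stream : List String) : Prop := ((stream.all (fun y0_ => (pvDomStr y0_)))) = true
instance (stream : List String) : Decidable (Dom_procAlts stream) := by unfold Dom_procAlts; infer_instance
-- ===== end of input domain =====

-- B is one linear pass with a current-segment buffer instead of A's repeated index/slice scans (simpler decomposition; measured same speed on the test inputs).

-- ===== PORT A =====
-- A's while loop: shrinks `end` past the first pipe each iteration (the `pipe in end`
-- guard makes index? return some; `.getD 0` is exact under that guard).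
def procAltsGo (ret : List (List String)) (e : List String) : List (List String) :=
  if e.length ≠ 0 then
    if hp : "|" ∈ e then
      let i : Nat := (PySem.List.index? e "|").getD 0
      procAltsGo (ret ++ [PySem.List.slice e none (some (i : Int))])
                 (PySem.List.slice e (some ((i : Int) + 1)) none)
    else ret ++ [e]
  else ret
termination_by e.length
decreasing_by
  have : ((i : Int) + 1) = (((i + 1 : Nat)) : Int) := by push_cast; ring
  rw [this, PySem.List.slice_from_natCast]
  simp only [List.length_drop]
  omega

def procAlts (stream : List String) : List (List String) :=
  procAltsGo [] stream

-- ===== PORT B =====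
def procAlts_alt (stream : List String) : List (List String) :=
  let p := stream.foldl
    (fun (p : List (List String) × List String) x =>
      if x = "|" then (p.1 ++ [p.2], ([] : List String)) else (p.1, p.2 ++ [x]))
    ([], [])
  let ret := p.1 ++ [p.2]
  if ret ≠ [] ∧ ret.getLast? = some [] then ret.dropLast else ret

-- ===== PRECONDITION & SPEC =====
def Spec_procAlts (stream : List String) (out : List (List String)) : Prop := out = procAlts_alt stream
instance (stream : List String) (out : List (List String)) : Decidable (Spec_procAlts stream out) := by unfold Spec_procAlts; infer_instance

-- ===== CLAIM (what is proved, stated in full; the proofs are below) =====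
def Claim_equal_procAlts : Prop := ∀ (stream : List String), Dom_procAlts stream → Spec_procAlts stream (procAlts stream)

-- ===== LEMMAS AND PROOFS =====

-- the full pipe-split of a list, including a trailing empty segment
def splitF : List String → List (List String)
  | [] => [[]]
  | x :: xs =>
    if x = "|" then [] :: splitF xs
    else
      match splitF xs with
      | [] => [[x]]          -- unreachable (splitF never returns [])
      | h :: t => (x :: h) :: t

-- drop the last segment iff it is empty (B's post-loop pop)
def popE (l : List (List String)) : List (List String) :=
  if l ≠ [] ∧ l.getLast? = some [] then l.dropLast else l

lemma splitF_ne_nil (l : List String) : splitF l ≠ [] := by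
  cases l with
  | nil => simp [splitF]
  | cons x xs =>
    simp only [splitF]
    split_ifs
    · simp
    · rcases h : splitF xs with _ | ⟨h', t⟩ <;> simp

lemma popE_cons (a : List String) (l : List (List String)) (h : l ≠ []) :
    popE (a :: l) = a :: popE l := by
  cases l with
  | nil => exact absurd rfl h
  | cons b t =>
    simp only [popE, List.getLast?_cons_cons, List.dropLast_cons₂]
    split_ifs with h1 h2 h2 <;> simp_all

lemma splitF_no_pipe (l : List String) (h : "|" ∉ l) : splitF l = [l] := by
  induction l with
  | nil => rfl
  | cons x xs ih =>
    simp only [List.mem_cons, not_or] at h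
    rw [splitF, if_neg (fun e => h.1 e.symm), ih h.2]

lemma splitF_index (l : List String) (i : Nat) (h : PySem.List.index? l "|" = some i) :
    splitF l = l.take i :: splitF (l.drop (i + 1)) := by
  induction l generalizing i with
  | nil => simp [PySem.List.index?] at h
  | cons x xs ih =>
    by_cases hx : x = "|"
    · subst hx
      rw [PySem.List.index?_cons_self] at h
      cases h
      simp [splitF]
    · rw [PySem.List.index?_cons_of_ne xs hx] at h
      rcases Option.map_eq_some_iff.mp h with ⟨j, hj, rfl⟩
      simp only [splitF, if_neg hx, ih j hj, List.take_succ_cons, List.drop_succ_cons]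

-- B's fold, finalized by appending the buffer, is splitF with the pending buffer
-- prepended onto the first remaining segment.
lemma fold_splitF (l : List String) : ∀ (ret : List (List String)) (cur : List String),
    (List.foldl
      (fun (p : List (List String) × List String) x =>
        if x = "|" then (p.1 ++ [p.2], ([] : List String)) else (p.1, p.2 ++ [x]))
      (ret, cur) l).1 ++
    [(List.foldl
      (fun (p : List (List String) × List String) x =>
        if x = "|" then (p.1 ++ [p.2], ([] : List String)) else (p.1, p.2 ++ [x]))
      (ret, cur) l).2] =
    ret ++ (match splitF l with
            | [] => [cur]
            | h :: t => (cur ++ h) :: t) := by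
  induction l with
  | nil => intro ret cur; simp [splitF]
  | cons x xs ih =>
    intro ret cur
    rw [List.foldl_cons]
    by_cases hx : x = "|"
    · subst hx
      rw [if_pos rfl, ih (ret ++ [cur]) []]
      rcases h : splitF xs with _ | ⟨h', t⟩
      · exact absurd h (splitF_ne_nil xs)
      · simp [splitF, h]
    · rw [if_neg hx, ih ret (cur ++ [x])]
      rcases h : splitF xs with _ | ⟨h', t⟩
      · exact absurd h (splitF_ne_nil xs)
      · simp [splitF, hx, h]

lemma alt_eq_popE_splitF (l : List String) : procAlts_alt l = popE (splitF l) := by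
  simp only [procAlts_alt, popE]
  rw [fold_splitF l [] []]
  rcases h : splitF l with _ | ⟨h', t⟩
  · exact absurd h (splitF_ne_nil l)
  · simp

lemma go_eq (n : Nat) : ∀ (e : List String), e.length = n →
    ∀ (ret : List (List String)), procAltsGo ret e = ret ++ popE (splitF e) := by
  induction n using Nat.strong_induction_on with
  | _ n ih =>
    intro e hlen ret
    rw [procAltsGo]
    by_cases h0 : e.length ≠ 0
    · rw [if_pos h0]
      by_cases hp : "|" ∈ e
      · rw [dif_pos hp]
        obtain ⟨j, hj⟩ := Option.isSome_iff_exists.mp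
          ((PySem.List.index?_isSome_iff e "|").mpr hp)
        have hgd : (PySem.List.index? e "|").getD 0 = j := by rw [hj]; rfl
        simp only [hgd]
        have hc : ((j : Int) + 1) = (((j + 1 : Nat)) : Int) := by push_cast; ring
        rw [hc, PySem.List.slice_from_natCast, PySem.List.slice_to_natCast]
        have hlt : (e.drop (j + 1)).length < n := by
          simp only [List.length_drop]; omega
        rw [ih _ hlt _ rfl]
        rw [splitF_index e j hj, popE_cons _ _ (splitF_ne_nil _)]
        simp
      · rw [dif_neg hp]
        have he : e ≠ [] := by intro h; subst h; simp at h0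
        rw [splitF_no_pipe e hp]
        unfold popE
        simp [he]
    · rw [if_neg h0]
      have : e = [] := by by_contra h; exact h0 (by simp [h])
      subst this
      simp [splitF, popE]

-- ===== VERDICT (by name: the statement is the Claim_ definition above) =====
theorem procAlts_spec : Claim_equal_procAlts := by
  intro stream _
  unfold Spec_procAlts procAlts
  rw [go_eq stream.length stream rfl, alt_eq_popE_splitF, List.nil_append]
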